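-- pv_equiv track=rewrite | github.com/dajinkya1099/AI_INTEGRATED_DASHBOARD | hrms_backend/app/schema_generator.py | clean_sql_query_and_append_schemaName
-- ===== SOURCE A (Python) =====
-- def clean_sql_query_and_append_schemaName(schema_name: str,sql_text: str) -> str:
--
--     # 1️⃣ Remove markdown
--     sql_text = sql_text.replace("```sql", "")
--     sql_text = sql_text.replace("```", "")
--     sql_text = sql_text.strip()
--
--     words = sql_text.split()
--     new_words = []
--
--     for i in range(len(words)):
--         word = words[i]
--
--         # If previous word was FROM or JOIN
--         if i > 0 and words[i-1].upper() in ["FROM", "JOIN"]: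
--
--             # If schema already not added
--             if "." not in word:
--                 word = f"{schema_name}.{word}"
--
--         new_words.append(word)
--
--     return " ".join(new_words)
-- ===== SOURCE B (Python) =====
-- import re
--
-- _PAT = re.compile(r'(?<![^ ])(?:from|join) (?![^ ]*\.)', re.IGNORECASE)
--
-- def clean_sql_query_and_append_schemaName(schema_name: str, sql_text: str) -> str:
--     sql_text = sql_text.replace("```sql", "").replace("```", "").strip()
--     normalized = " ".join(sql_text.split())
--     # insert "<schema>." right after every space-delimited FROM/JOIN whose next
--     # token contains no dot (the match consumes only the keyword and its space,
--     # so consecutive keywords are all handled)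
--     return _PAT.sub(lambda m: m.group(0) + schema_name + ".", normalized)
-- ===== Notes on version B (the rewrite author's own statement) =====
-- stated objective: idiomatic
-- what changed: Replaces A's split-into-words index loop (rebuilding each token while looking back at words[i-1]) by a single re.sub over the whitespace-normalized string: a compiled case-insensitive pattern matches a space-delimited FROM/JOIN plus its trailing space, with a lookahead rejecting a dotted next token, and the substitution inserts 'schema.' in place.
import Mathlib
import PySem

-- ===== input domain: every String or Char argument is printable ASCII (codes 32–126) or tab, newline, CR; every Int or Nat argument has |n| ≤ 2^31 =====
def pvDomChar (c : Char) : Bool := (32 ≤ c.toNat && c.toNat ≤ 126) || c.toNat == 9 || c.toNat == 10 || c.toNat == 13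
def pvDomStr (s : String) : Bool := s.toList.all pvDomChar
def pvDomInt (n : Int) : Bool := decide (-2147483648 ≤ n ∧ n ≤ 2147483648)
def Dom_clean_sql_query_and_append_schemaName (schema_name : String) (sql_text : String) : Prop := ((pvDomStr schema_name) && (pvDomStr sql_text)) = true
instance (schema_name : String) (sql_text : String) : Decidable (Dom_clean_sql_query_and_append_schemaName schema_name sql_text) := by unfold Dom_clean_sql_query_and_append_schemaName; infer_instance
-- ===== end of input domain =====

-- B replaces A's index loop over the split word list by a single regex-style substitution
-- pass over the whitespace-normalized string (insert "schema." after each space-delimited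
-- FROM/JOIN whose next token has no dot); objective: idiomatic.

-- ===== PORT A =====
def pvABody (schema_name : String) (words : List String) (acc : List String) (i : Int) : List String :=
  let word := PySem.List.pyGetD words i ""
  let word :=
    if 0 < i ∧ PySem.Str.upper (PySem.List.pyGetD words (i - 1) "") ∈ ["FROM", "JOIN"] then
      (if PySem.Str.isIn "." word = false then schema_name ++ "." ++ word else word)
    else word
  acc ++ [word]

def clean_sql_query_and_append_schemaName (schema_name : String) (sql_text : String) : String :=
  let s1 := PySem.Str.replace sql_text "```sql" ""
  let s2 := PySem.Str.replace s1 "```" ""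
  let s3 := PySem.Str.strip s2
  let words := PySem.Str.split₀ s3
  let new_words := (PySem.List.pyRange 0 (words.length : Int) 1).foldl (pvABody schema_name words) []
  PySem.Str.join " " new_words

-- ===== PORT B =====
-- Hand port of Source B's compiled regex  r'(?<![^ ])(?:from|join) (?![^ ]*\.)'  (IGNORECASE)
-- with replacement  m.group(0) + schema_name + "." : a left-to-right scan that at each
-- position tries the pattern (the lookbehind is the carried `atStart` flag: position 0 or
-- a preceding ' '; the keyword alternative and its space are the 5 chars compared
-- case-insensitively; the lookahead checks the run up to the next ' ' for a '.'),
-- consumes the 5 matched chars on success, else advances one char — exactly re.sub's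
-- leftmost non-overlapping scan for this pattern (IGNORECASE realized by upper-casing,
-- exact on ASCII).
def pvMatchKw (l : List Char) : Bool :=
  decide (PySem.Chars.upper (l.take 5) = "FROM ".toList ∨ PySem.Chars.upper (l.take 5) = "JOIN ".toList)

def pvNoDotAhead (l : List Char) : Bool :=
  decide ('.' ∉ l.takeWhile (· ≠ ' '))

def pvSub (σ : List Char) : Bool → List Char → List Char
  | _, [] => []
  | atStart, c :: rest =>
    if atStart && pvMatchKw (c :: rest) && pvNoDotAhead (List.drop 5 (c :: rest)) then
      List.take 5 (c :: rest) ++ σ ++ '.' :: pvSub σ true (List.drop 5 (c :: rest))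
    else
      c :: pvSub σ (c == ' ') rest
termination_by _ l => l.length
decreasing_by
  all_goals simp

def clean_sql_query_and_append_schemaName_alt (schema_name : String) (sql_text : String) : String :=
  let s := PySem.Str.strip (PySem.Str.replace (PySem.Str.replace sql_text "```sql" "") "```" "")
  let normalized := PySem.Str.join " " (PySem.Str.split₀ s)
  String.ofList (pvSub schema_name.toList true normalized.toList)

-- ===== PRECONDITION & SPEC =====
def Spec_clean_sql_query_and_append_schemaName (schema_name : String) (sql_text : String) (out : String) : Prop := out = clean_sql_query_and_append_schemaName_alt schema_name sql_text
instance (schema_name : String) (sql_text : String) (out : String) : Decidable (Spec_clean_sql_query_and_append_schemaName schema_name sql_text out) := by unfold Spec_clean_sql_query_and_append_schemaName; infer_instance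

-- ===== CLAIM (what is proved, stated in full; the proofs are below) =====
def Claim_equal_clean_sql_query_and_append_schemaName : Prop := ∀ (schema_name : String) (sql_text : String), Dom_clean_sql_query_and_append_schemaName schema_name sql_text → Spec_clean_sql_query_and_append_schemaName schema_name sql_text (clean_sql_query_and_append_schemaName schema_name sql_text)

-- ===== LEMMAS AND PROOFS =====

-- the element A produces at index i of the word list
def pvElemA (schema_name : String) (words : List String) (i : Int) : String :=
  if 0 < i ∧ PySem.Str.upper (PySem.List.pyGetD words (i - 1) "") ∈ ["FROM", "JOIN"] then
    (if PySem.Str.isIn "." (PySem.List.pyGetD words i "") = false then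
      schema_name ++ "." ++ PySem.List.pyGetD words i "" else PySem.List.pyGetD words i "")
  else PySem.List.pyGetD words i ""

theorem pvABody_eq (schema_name : String) (words : List String) :
    pvABody schema_name words = fun acc i => acc ++ [pvElemA schema_name words i] := by
  funext acc i; rfl

theorem pvA_list_eq_map (schema_name : String) (words : List String) :
    (PySem.List.pyRange 0 (words.length : Int) 1).foldl (pvABody schema_name words) [] =
      (PySem.List.pyRange 0 (words.length : Int) 1).map (pvElemA schema_name words) := by
  rw [pvABody_eq]
  simpa using PySem.List.foldl_append_singleton_eq_map
    (l := PySem.List.pyRange 0 (words.length : Int) 1) (f := pvElemA schema_name words) (acc := [])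

-- char-level keyword / dot tests shared by the two sides
def pvKw (w : List Char) : Bool :=
  decide (PySem.Chars.upper w = "FROM".toList ∨ PySem.Chars.upper w = "JOIN".toList)

def pvDot (w : List Char) : Bool := decide ('.' ∈ w)

-- the word-level recursion both ports compute (char level)
def pvG (σ : List Char) : List (List Char) → List Char
  | [] => []
  | [w] => w
  | w :: v :: t =>
      w ++ ' ' :: (if pvKw w && !pvDot v then σ ++ '.' :: pvG σ (v :: t) else pvG σ (v :: t))

theorem up_space (c : Char) : PySem.Chars.upperChar c = ' ' ↔ c = ' ' := by
  constructor
  · intro he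
    unfold PySem.Chars.upperChar at he
    split at he
    · next h =>
      simp [PySem.Chars.islower, Char.le_def] at h
      have hlo : 97 ≤ c.toNat ∧ c.toNat ≤ 122 := by
        obtain ⟨h1, h2⟩ := h
        exact ⟨by exact_mod_cast UInt32.le_iff_toNat_le.mp h1,
               by exact_mod_cast UInt32.le_iff_toNat_le.mp h2⟩
      have h32 : (Char.ofNat (c.toNat - 32)).toNat = 32 := by rw [he]; decide
      rw [Char.toNat_ofNat] at h32
      split at h32 <;> omega
    · exact he
  · intro h; subst h; decide

theorem match_mem_space (l : List Char) (h : pvMatchKw l = true) : ' ' ∈ l := by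
  have hu : PySem.Chars.upper (l.take 5) = "FROM ".toList ∨
      PySem.Chars.upper (l.take 5) = "JOIN ".toList := by
    simpa [pvMatchKw] using h
  have hF : "FROM ".toList = ['F','R','O','M',' '] := by decide
  have hJ : "JOIN ".toList = ['J','O','I','N',' '] := by decide
  have hmem : ' ' ∈ PySem.Chars.upper (l.take 5) := by
    rcases hu with hu | hu <;> rw [hu] <;> simp [hF, hJ]
  simp only [PySem.Chars.upper, List.mem_map] at hmem
  obtain ⟨c, hc, hcu⟩ := hmem
  have : c = ' ' := (up_space c).mp hcu
  exact List.mem_of_mem_take (this ▸ hc)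

theorem pvKw_len (w : List Char) (h : pvKw w = true) : w.length = 4 := by
  have hu : PySem.Chars.upper w = "FROM".toList ∨ PySem.Chars.upper w = "JOIN".toList := by
    simpa [pvKw] using h
  rcases hu with hu | hu <;>
    simpa [PySem.Chars.upper] using congrArg List.length hu

-- the scanner never fires inside a space-free run
theorem pvSub_nospace (σ : List Char) (b : Bool) :
    ∀ l : List Char, ' ' ∉ l → pvSub σ b l = l := by
  intro l
  induction l generalizing b with
  | nil => intro _; simp [pvSub]
  | cons c rest ih =>
    intro h
    have hm : pvMatchKw (c :: rest) = false := by
      cases hmk : pvMatchKw (c :: rest) with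
      | false => rfl
      | true => exact absurd (match_mem_space _ hmk) h
    rw [pvSub, hm]
    simp [ih (c == ' ') (fun hmem => h (List.mem_cons_of_mem _ hmem))]

-- walking a space-free run with the flag down emits it unchanged
theorem pvSub_false_append (σ : List Char) :
    ∀ (l tail : List Char), ' ' ∉ l → pvSub σ false (l ++ tail) = l ++ pvSub σ false tail := by
  intro l
  induction l with
  | nil => intro tail _; simp
  | cons c rest ih =>
    intro tail h
    have hc : (c == ' ') = false := by
      simp only [beq_eq_false_iff_ne, ne_eq]
      intro hh; exact h (hh ▸ List.mem_cons_self)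
    rw [List.cons_append, pvSub]
    simp [hc, ih tail (fun hmem => h (List.mem_cons_of_mem _ hmem))]

theorem pvMatchKw_join (w r : List Char) (hw : ' ' ∉ w) :
    pvMatchKw (w ++ ' ' :: r) = pvKw w := by
  have hF : "FROM ".toList = ['F','R','O','M',' '] := by decide
  have hJ : "JOIN ".toList = ['J','O','I','N',' '] := by decide
  have hF4 : "FROM".toList = ['F','R','O','M'] := by decide
  have hJ4 : "JOIN".toList = ['J','O','I','N'] := by decide
  have hS : PySem.Chars.upperChar ' ' = ' ' := by decide
  match w with
  | [] => simp [pvMatchKw, pvKw, hF, hJ, hF4, hJ4, PySem.Chars.upper, hS]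
  | [a] => simp [pvMatchKw, pvKw, hF, hJ, hF4, hJ4, PySem.Chars.upper, hS]
  | [a, b] => simp [pvMatchKw, pvKw, hF, hJ, hF4, hJ4, PySem.Chars.upper, hS]
  | [a, b, c] => simp [pvMatchKw, pvKw, hF, hJ, hF4, hJ4, PySem.Chars.upper, hS]
  | [a, b, c, d] => simp [pvMatchKw, pvKw, hF, hJ, hF4, hJ4, PySem.Chars.upper, hS]
  | a :: b :: c :: d :: e :: w' =>
    have he : e ≠ ' ' := fun hh => hw (by simp [hh])
    have heu : ¬ (PySem.Chars.upperChar e = ' ') := fun hh => he ((up_space e).mp hh)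
    simp [pvMatchKw, pvKw, hF, hJ, hF4, hJ4, PySem.Chars.upper, heu]

-- char join unfoldings
theorem joinC_cons_cons (w v : List Char) (t : List (List Char)) :
    PySem.Chars.join [' '] (w :: v :: t) = w ++ ' ' :: PySem.Chars.join [' '] (v :: t) := by
  simp [PySem.Chars.join, List.intercalate]

theorem joinC_singleton (w : List Char) : PySem.Chars.join [' '] [w] = w := by
  simp [PySem.Chars.join, List.intercalate]

-- the part of a join after its first word
def pvTail (L : List (List Char)) : List Char :=
  match L with
  | [] => []
  | _ :: _ => ' ' :: PySem.Chars.join [' '] L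

theorem joinC_cons (x : List Char) (L : List (List Char)) :
    PySem.Chars.join [' '] (x :: L) = x ++ pvTail L := by
  cases L with
  | nil => rw [joinC_singleton]; simp [pvTail]
  | cons y L' => rw [joinC_cons_cons]; rfl

theorem pvNoDotAhead_join (v : List Char) (t : List (List Char)) (hv : ' ' ∉ v) :
    pvNoDotAhead (PySem.Chars.join [' '] (v :: t)) = !pvDot v := by
  have hall : List.takeWhile (fun x => !decide (x = ' ')) v = v := by
    apply List.takeWhile_eq_self_iff.mpr
    intro c hc
    simp only [Bool.not_eq_eq_eq_not, Bool.not_true, decide_eq_false_iff_not]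
    intro hh; exact hv (hh ▸ hc)
  cases t with
  | nil =>
    rw [joinC_singleton]
    simp only [pvNoDotAhead, pvDot]
    rw [show (fun c : Char => decide (c ≠ ' ')) = (fun x : Char => !decide (x = ' ')) from by
      funext c; simp, hall]
    simp
  | cons u t' =>
    rw [joinC_cons_cons]
    simp only [pvNoDotAhead, pvDot]
    rw [show (fun c : Char => decide (c ≠ ' ')) = (fun x : Char => !decide (x = ' ')) from by
      funext c; simp, List.takeWhile_append, hall]
    simp

-- B's scanner computes the word-level recursion on the joined word list
theorem pvSub_join (σ : List Char) :
    ∀ css : List (List Char), (∀ w ∈ css, w ≠ [] ∧ ' ' ∉ w) →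
      pvSub σ true (PySem.Chars.join [' '] css) = pvG σ css := by
  intro css
  induction css with
  | nil => intro _; simp [PySem.Chars.join, List.intercalate, pvSub, pvG]
  | cons w rest ih =>
    intro h
    obtain ⟨hwne, hwsp⟩ := h w List.mem_cons_self
    cases rest with
    | nil =>
      rw [joinC_singleton]
      rw [pvSub_nospace σ true w hwsp]
      rfl
    | cons v t =>
      obtain ⟨hvne, hvsp⟩ := h v (by simp)
      have hrest : ∀ u ∈ v :: t, u ≠ [] ∧ ' ' ∉ u := fun u hu => h u (List.mem_cons_of_mem _ hu)
      rw [joinC_cons_cons]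
      by_cases hcond : (pvKw w && !pvDot v) = true
      · -- the pattern fires at w
        have hkw : pvKw w = true := (Bool.and_eq_true _ _ |>.mp hcond).1
        have hdot : pvDot v = false := by
          have h2 := (Bool.and_eq_true _ _ |>.mp hcond).2; simpa using h2
        have hlen := pvKw_len w hkw
        obtain ⟨a, b, c, d, rfl⟩ : ∃ a b c d, w = [a, b, c, d] := by
          match w, hlen with | [a, b, c, d], _ => exact ⟨a, b, c, d, rfl⟩
        have hmk0 := (pvMatchKw_join [a,b,c,d] (PySem.Chars.join [' '] (v :: t)) hwsp).trans hkw
        have hnd : pvNoDotAhead (PySem.Chars.join [' '] (v :: t)) = true := by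
          rw [pvNoDotAhead_join v t hvsp, hdot]; rfl
        simp only [List.cons_append, List.nil_append] at hmk0 ⊢
        rw [pvSub, hmk0]
        simp only [List.drop_succ_cons, List.drop_zero, List.take_succ_cons, List.take_zero] at *
        rw [hnd]
        simp only [Bool.and_true]
        rw [ih hrest]
        simp [pvG, hkw, hdot]
      · -- no match at w: walk through it
        have hguard : (pvMatchKw (w ++ ' ' :: PySem.Chars.join [' '] (v :: t))
              && pvNoDotAhead (List.drop 5 (w ++ ' ' :: PySem.Chars.join [' '] (v :: t)))) = false := by
          rw [pvMatchKw_join w _ hwsp]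
          cases hkw : pvKw w with
          | false => simp
          | true =>
            have hlen := pvKw_len w hkw
            have hdot : pvDot v = true := by
              cases hdv : pvDot v with
              | false => exact absurd (by simp [hkw, hdv]) hcond
              | true => rfl
            obtain ⟨a, b, c, d, rfl⟩ : ∃ a b c d, w = [a, b, c, d] := by
              match w, hlen with | [a, b, c, d], _ => exact ⟨a, b, c, d, rfl⟩
            have hdrop : List.drop 5 ([a,b,c,d] ++ ' ' :: PySem.Chars.join [' '] (v :: t))
                = PySem.Chars.join [' '] (v :: t) := by simp
            rw [hdrop, pvNoDotAhead_join v t hvsp, hdot]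
            simp
        obtain ⟨wh, wt, rfl⟩ : ∃ wh wt, w = wh :: wt := by
          match w, hwne with | wh :: wt, _ => exact ⟨wh, wt, rfl⟩
        have hwh : (wh == ' ') = false := by
          simp only [beq_eq_false_iff_ne, ne_eq]
          intro hh; exact hwsp (hh ▸ List.mem_cons_self)
        rw [List.cons_append, pvSub]
        simp only [List.cons_append] at hguard
        simp only [Bool.true_and, hguard, Bool.false_eq_true, if_false]
        rw [hwh]
        rw [pvSub_false_append σ wt (' ' :: PySem.Chars.join [' '] (v :: t))
          (fun hmem => hwsp (List.mem_cons_of_mem _ hmem))]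
        rw [pvSub]
        simp only [Bool.false_and, Bool.false_eq_true, if_false]
        rw [show (' ' == ' ') = true from rfl, ih hrest]
        simp [pvG, hcond]

-- split() produces nonempty, space-free words
theorem split0_go_nil (cur : List Char) (acc : List (List Char)) :
    PySem.Chars.split₀.go [] cur acc =
      if cur.isEmpty then acc.reverse else (cur.reverse :: acc).reverse := by
  rw [PySem.Chars.split₀.go.eq_def]

theorem split0_go_cons (c : Char) (rest cur : List Char) (acc : List (List Char)) :
    PySem.Chars.split₀.go (c :: rest) cur acc =
      if PySem.Chars.isspace c then
        (if cur.isEmpty then PySem.Chars.split₀.go rest [] acc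
         else PySem.Chars.split₀.go rest [] (cur.reverse :: acc))
      else PySem.Chars.split₀.go rest (c :: cur) acc := by
  rw [PySem.Chars.split₀.go.eq_def]

theorem split0_go_shape :
    ∀ (cs cur : List Char) (acc : List (List Char)),
      (∀ c ∈ cur, PySem.Chars.isspace c = false) →
      (∀ w ∈ acc, w ≠ [] ∧ ∀ c ∈ w, PySem.Chars.isspace c = false) →
      ∀ w ∈ PySem.Chars.split₀.go cs cur acc, w ≠ [] ∧ ∀ c ∈ w, PySem.Chars.isspace c = false := by
  intro cs
  induction cs with
  | nil =>
    intro cur acc hcur hacc w hw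
    rw [split0_go_nil] at hw
    split at hw
    · exact hacc w (List.mem_reverse.mp hw)
    · next hne =>
      rcases List.mem_cons.mp (List.mem_reverse.mp hw) with h1 | h2
      · subst h1
        refine ⟨by simpa [List.isEmpty_iff] using hne, ?_⟩
        intro c hc; exact hcur c (List.mem_reverse.mp hc)
      · exact hacc w h2
  | cons c rest ih =>
    intro cur acc hcur hacc w hw
    rw [split0_go_cons] at hw
    split at hw
    · split at hw
      · exact ih [] acc (by simp) hacc w hw
      · next hne =>
        refine ih [] (cur.reverse :: acc) (by simp) ?_ w hw
        intro u hu
        rcases List.mem_cons.mp hu with h1 | h2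
        · subst h1
          refine ⟨by simpa [List.isEmpty_iff] using hne, ?_⟩
          intro x hx; exact hcur x (List.mem_reverse.mp hx)
        · exact hacc u h2
    · next hsp =>
      refine ih (c :: cur) acc ?_ hacc w hw
      intro x hx
      rcases List.mem_cons.mp hx with h1 | h2
      · subst h1; simpa using hsp
      · exact hcur x h2

theorem split0_shape (cs : List Char) :
    ∀ w ∈ PySem.Chars.split₀ cs, w ≠ [] ∧ ' ' ∉ w := by
  intro w hw
  have hh := split0_go_shape cs [] [] (by simp) (by simp) w (by simpa [PySem.Chars.split₀] using hw)
  refine ⟨hh.1, fun hmem => ?_⟩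
  have := hh.2 ' ' hmem
  simp [PySem.Chars.isspace] at this

-- bridges between A's String-level tests and the char-level tests
theorem kw_bridge (w : String) :
    (PySem.Str.upper w ∈ ["FROM", "JOIN"]) ↔ pvKw w.toList = true := by
  simp only [pvKw, decide_eq_true_eq, List.mem_cons, List.not_mem_nil, or_false]
  constructor
  · rintro (h | h) <;>
    · rw [← h]
      simp [PySem.Str.upper]
  · rintro (h | h)
    · left; apply String.toList_inj.mp; simpa [PySem.Str.upper] using h
    · right; apply String.toList_inj.mp; simpa [PySem.Str.upper] using h

theorem dot_bridge (v : String) : PySem.Str.isIn "." v = pvDot v.toList := by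
  rw [Bool.eq_iff_iff]
  constructor
  · intro hi
    have hinf : ("." : String).toList <:+: v.toList := (PySem.Str.isIn_iff_infix _ _).mp hi
    have : '.' ∈ v.toList := hinf.mem (by simp [show ("." : String).toList = ['.'] from rfl])
    simpa [pvDot] using this
  · intro hd
    have hm : '.' ∈ v.toList := by simpa [pvDot] using hd
    obtain ⟨s, t, hst⟩ := List.append_of_mem hm
    exact (PySem.Str.isIn_iff_infix _ _).mpr ⟨s, t, by simp [hst, show ("." : String).toList = ['.'] from rfl]⟩

-- String-level join unfoldings
theorem strJoin_toList (L : List String) :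
    (PySem.Str.join " " L).toList = PySem.Chars.join [' '] (L.map String.toList) := by
  simp [PySem.Str.join]

theorem strJoin_cons (x : String) (L : List String) (h : L ≠ []) :
    (PySem.Str.join " " (x :: L)).toList = x.toList ++ ' ' :: (PySem.Str.join " " L).toList := by
  match L, h with
  | y :: L', _ =>
    rw [strJoin_toList, strJoin_toList, List.map_cons, List.map_cons, joinC_cons_cons]

-- the shift: A's element at 2+k of (w :: v :: t) is its element at 1+k of (v :: t)
theorem pvElemA_shift (sn : String) (w v : String) (t : List String) (k : Nat) :
    pvElemA sn (w :: v :: t) ((2 : Int) + k) = pvElemA sn (v :: t) ((1 : Int) + k) := by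
  have h2 : ((2 : Int) + k) = ((k + 2 : Nat) : Int) := by push_cast; ring
  have h1 : ((1 : Int) + k) = ((k + 1 : Nat) : Int) := by push_cast; ring
  have h2' : ((2 : Int) + k - 1) = ((k + 1 : Nat) : Int) := by push_cast; ring
  have h1' : ((1 : Int) + k - 1) = ((k : Nat) : Int) := by ring
  unfold pvElemA
  rw [h2', h1']
  rw [h2, h1]
  simp only [PySem.List.pyGetD_natCast]
  have e1 : (w :: v :: t).getD (k + 2) "" = t.getD k "" := by simp
  have e2 : (w :: v :: t).getD (k + 1) "" = (v :: t).getD k "" := by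
    cases k <;> simp
  have e3 : (v :: t).getD (k + 1) "" = t.getD k "" := by simp
  rw [e1, e2, e3]
  have hp2 : (0 : Int) < (k : Int) + 2 := by positivity
  have hp1 : (0 : Int) < (k : Int) + 1 := by positivity
  simp [hp2, hp1]

theorem pvElemA_zero (sn : String) (ws : List String) (w : String) (h : ws.getD 0 "" = w) :
    pvElemA sn ws 0 = w := by
  unfold pvElemA
  rw [if_neg (by simp), PySem.List.pyGetD_zero, h]

theorem pvA_join (sn : String) :
    ∀ ws : List String,
      (PySem.Str.join " " ((PySem.List.pyRange 0 (ws.length : Int) 1).map (pvElemA sn ws))).toList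
        = pvG sn.toList (ws.map String.toList) := by
  intro ws
  induction ws with
  | nil => simp [PySem.List.pyRange_one_eq_nil, PySem.Chars.join, List.intercalate, pvG]
  | cons w rest ih =>
    cases rest with
    | nil =>
      have hr : PySem.List.pyRange 0 (([w] : List String).length : Int) 1 = [0] := by
        simpa using PySem.List.pyRange_one_singleton (a := (0 : Int))
      rw [hr]
      have he : pvElemA sn [w] 0 = w := pvElemA_zero sn [w] w (by simp)
      simp only [List.map_cons, List.map_nil, he]
      rw [strJoin_toList]
      simp [pvG]
    | cons v t =>
      have htl : (0 : Int) ≤ (t.length : Int) := Int.natCast_nonneg _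
      have hlen : (((w :: v :: t).length : Int)) = (t.length : Int) + 2 := by
        simp [List.length_cons]
        ring
      have e01 : PySem.List.pyRange 0 ((t.length : Int) + 2) 1
          = 0 :: 1 :: PySem.List.pyRange 2 ((t.length : Int) + 2) 1 := by
        rw [PySem.List.pyRange_one_cons (by omega), show (0 : Int) + 1 = 1 by norm_num,
            PySem.List.pyRange_one_cons (by omega), show (1 : Int) + 1 = 2 by norm_num]
      have hlen' : (((v :: t).length : Int)) = (t.length : Int) + 1 := by
        push_cast [List.length_cons]; ring
      have e0 : PySem.List.pyRange 0 ((t.length : Int) + 1) 1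
          = 0 :: PySem.List.pyRange 1 ((t.length : Int) + 1) 1 := by
        rw [PySem.List.pyRange_one_cons (by omega), show (0 : Int) + 1 = 1 by norm_num]
      have hE0 : pvElemA sn (w :: v :: t) 0 = w := pvElemA_zero sn _ w (by simp)
      have hE0' : pvElemA sn (v :: t) 0 = v := pvElemA_zero sn _ v (by simp)
      have hE1 : pvElemA sn (w :: v :: t) 1 =
          if PySem.Str.upper w ∈ ["FROM", "JOIN"] then
            (if PySem.Str.isIn "." v = false then sn ++ "." ++ v else v) else v := by
        have hg1 : PySem.List.pyGetD (w :: v :: t) (1 : Int) "" = v := by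
          rw [show (1 : Int) = ((1 : Nat) : Int) from by norm_num, PySem.List.pyGetD_natCast]
          simp
        have hg0 : PySem.List.pyGetD (w :: v :: t) ((1 : Int) - 1) "" = w := by
          rw [show (1 : Int) - 1 = (0 : Int) from by norm_num, PySem.List.pyGetD_zero]
          simp
        unfold pvElemA
        rw [hg1, hg0]
        simp
      have hM : (PySem.List.pyRange 2 ((t.length : Int) + 2) 1).map (pvElemA sn (w :: v :: t))
          = (PySem.List.pyRange 1 ((t.length : Int) + 1) 1).map (pvElemA sn (v :: t)) := by
        rw [PySem.List.pyRange_one 2, PySem.List.pyRange_one 1]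
        rw [show ((t.length : Int) + 2 - 2).toNat = t.length by omega,
            show ((t.length : Int) + 1 - 1).toNat = t.length by omega]
        simp only [List.map_map]
        apply List.map_congr_left
        intro k _
        simpa using pvElemA_shift sn w v t k
      rw [hlen, e01]
      simp only [List.map_cons, hE0, hE1, hM]
      -- both sides now decompose as  w.toList ++ ' ' :: …
      rw [hlen', e0] at ih
      simp only [List.map_cons, hE0'] at ih
      have hP : (PySem.Str.join " "
            ((if PySem.Str.upper w ∈ ["FROM", "JOIN"] then
              (if PySem.Str.isIn "." v = false then sn ++ "." ++ v else v) else v)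
             :: (PySem.List.pyRange 1 ((t.length : Int) + 1) 1).map (pvElemA sn (v :: t)))).toList
          = (if pvKw w.toList && !pvDot v.toList then
              sn.toList ++ '.' :: (PySem.Str.join " "
                (v :: (PySem.List.pyRange 1 ((t.length : Int) + 1) 1).map (pvElemA sn (v :: t)))).toList
            else (PySem.Str.join " "
                (v :: (PySem.List.pyRange 1 ((t.length : Int) + 1) 1).map (pvElemA sn (v :: t)))).toList) := by
        by_cases hc : PySem.Str.upper w ∈ ["FROM", "JOIN"]
        · have hkw : pvKw w.toList = true := (kw_bridge w).mp hc
          by_cases hd : PySem.Str.isIn "." v = false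
          · have hdot : pvDot v.toList = false := by rw [← dot_bridge]; exact hd
            rw [if_pos hc, if_pos hd, if_pos (by simp [hkw, hdot])]
            rw [strJoin_toList, strJoin_toList, List.map_cons, List.map_cons, joinC_cons, joinC_cons]
            simp [String.toList_append, show ("." : String).toList = ['.'] from rfl]
          · have hdot : pvDot v.toList = true := by
              rw [← dot_bridge]; simpa using hd
            rw [if_pos hc, if_neg hd, if_neg (by simp [hdot])]
        · have hkw : pvKw w.toList = false := by
            cases hk : pvKw w.toList with
            | false => rfl
            | true => exact absurd ((kw_bridge w).mpr hk) hc
          rw [if_neg hc, if_neg (by simp [hkw])]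
      rw [strJoin_cons _ _ (by simp), hP, ih]
      simp only [pvG]

-- ===== VERDICT (by name: the statement is the Claim_ definition above) =====
theorem clean_sql_query_and_append_schemaName_spec : Claim_equal_clean_sql_query_and_append_schemaName := by
  intro schema_name sql_text _
  unfold Spec_clean_sql_query_and_append_schemaName
  unfold clean_sql_query_and_append_schemaName clean_sql_query_and_append_schemaName_alt
  simp only [pvA_list_eq_map]
  apply String.toList_inj.mp
  rw [pvA_join]
  have hlist : (PySem.Str.split₀ (PySem.Str.strip (PySem.Str.replace (PySem.Str.replace sql_text "```sql" "") "```" ""))).map String.toList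
      = PySem.Chars.split₀ (PySem.Str.strip (PySem.Str.replace (PySem.Str.replace sql_text "```sql" "") "```" "")).toList :=
    PySem.Str.split₀_map_toList _
  have hshape := split0_shape (PySem.Str.strip (PySem.Str.replace (PySem.Str.replace sql_text "```sql" "") "```" "")).toList
  rw [show (String.ofList (pvSub schema_name.toList true
      (PySem.Str.join " " (PySem.Str.split₀ (PySem.Str.strip (PySem.Str.replace (PySem.Str.replace sql_text "```sql" "") "```" "")))).toList)).toList
    = pvSub schema_name.toList true
      (PySem.Str.join " " (PySem.Str.split₀ (PySem.Str.strip (PySem.Str.replace (PySem.Str.replace sql_text "```sql" "") "```" "")))).toList from by simp]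
  rw [strJoin_toList, hlist]
  rw [pvSub_join schema_name.toList _ hshape, ← hlist]
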